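-- pv_equiv track=rewrite | github.com/phdfinancecodyS/MikecodyRepo | scripts/pinterest_automation.py | board_for_tags
-- ===== SOURCE A (Python) =====
-- def board_for_tags(tags: list[str]) -> str:
--     low = {t.lower() for t in tags}
--     if "suicide prevention" in low or "crisis planning" in low:
--         return "Crisis Conversation Support"
--     if "couples help" in low or "relationship help" in low:
--         return "Relationship Communication Tools"
--     if "parenting stress" in low or "family conflict" in low:
--         return "Family Check In Worksheets"
--     if "sleep help" in low or "insomnia help" in low or "sleep hygiene" in low:
--         return "Sleep and Stress Reset"
--     if "burnout" in low or "burnout recovery" in low or "work stress" in low: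
--         return "Burnout Recovery Printables"
--     return "Mental Health Conversation Guides"
-- ===== SOURCE B (Python) =====
-- TRIGGER_PRIORITY = {
--     "suicide prevention": 0, "crisis planning": 0,
--     "couples help": 1, "relationship help": 1,
--     "parenting stress": 2, "family conflict": 2,
--     "sleep help": 3, "insomnia help": 3, "sleep hygiene": 3,
--     "burnout": 4, "burnout recovery": 4, "work stress": 4,
-- }
--
-- BOARDS = [
--     "Crisis Conversation Support",
--     "Relationship Communication Tools",
--     "Family Check In Worksheets",
--     "Sleep and Stress Reset",
--     "Burnout Recovery Printables",
--     "Mental Health Conversation Guides",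
-- ]
--
-- def board_for_tags(tags: list[str]) -> str:
--     best = 5
--     for t in tags:
--         best = min(best, TRIGGER_PRIORITY.get(t.lower(), 5))
--     return BOARDS[best]
-- ===== Notes on version B (the rewrite author's own statement) =====
-- stated objective: alternative
-- what changed: Instead of building a lowercase set and testing twelve fixed trigger strings against it in a branch chain, B makes one pass over the tags keeping the minimum priority found via a trigger-to-priority map, then indexes a board table with that minimum.
import Mathlib
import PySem

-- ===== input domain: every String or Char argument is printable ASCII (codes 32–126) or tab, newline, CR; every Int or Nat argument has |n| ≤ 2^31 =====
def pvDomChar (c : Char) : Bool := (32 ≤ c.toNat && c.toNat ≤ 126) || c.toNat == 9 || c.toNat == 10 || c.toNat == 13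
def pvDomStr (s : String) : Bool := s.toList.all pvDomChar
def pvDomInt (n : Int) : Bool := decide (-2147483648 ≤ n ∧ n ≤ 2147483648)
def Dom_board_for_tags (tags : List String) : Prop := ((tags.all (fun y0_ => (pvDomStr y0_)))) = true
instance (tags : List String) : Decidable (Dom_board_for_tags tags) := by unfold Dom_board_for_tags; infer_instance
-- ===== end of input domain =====

-- B replaces A's lowercase-set + membership branch chain by a single min-reduction of per-tag priorities and a board-table index (objective: alternative).


-- ===== PORT A =====
def board_for_tags (tags : List String) : String :=
  let low : PySem.Set String := PySem.Set.ofList (tags.map PySem.Str.lower)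
  if PySem.Set.contains low "suicide prevention" || PySem.Set.contains low "crisis planning" then
    "Crisis Conversation Support"
  else if PySem.Set.contains low "couples help" || PySem.Set.contains low "relationship help" then
    "Relationship Communication Tools"
  else if PySem.Set.contains low "parenting stress" || PySem.Set.contains low "family conflict" then
    "Family Check In Worksheets"
  else if PySem.Set.contains low "sleep help" || PySem.Set.contains low "insomnia help" || PySem.Set.contains low "sleep hygiene" then
    "Sleep and Stress Reset"
  else if PySem.Set.contains low "burnout" || PySem.Set.contains low "burnout recovery" || PySem.Set.contains low "work stress" then
    "Burnout Recovery Printables"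
  else
    "Mental Health Conversation Guides"

-- ===== PORT B =====
def pvTriggerPriority : PySem.Dict String Int :=
  PySem.Dict.ofList
    [ ("suicide prevention", 0), ("crisis planning", 0),
      ("couples help", 1), ("relationship help", 1),
      ("parenting stress", 2), ("family conflict", 2),
      ("sleep help", 3), ("insomnia help", 3), ("sleep hygiene", 3),
      ("burnout", 4), ("burnout recovery", 4), ("work stress", 4) ]

def pvBoards : List String :=
  [ "Crisis Conversation Support",
    "Relationship Communication Tools",
    "Family Check In Worksheets",
    "Sleep and Stress Reset",
    "Burnout Recovery Printables",
    "Mental Health Conversation Guides" ]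

def board_for_tags_alt (tags : List String) : String :=
  let best : Int :=
    tags.foldl (fun b t => min b (PySem.Dict.getD pvTriggerPriority (PySem.Str.lower t) 5)) 5
  -- best always lies in [0, 5], so the index is in range and the .getD default is unreachable
  (PySem.List.pyGet? pvBoards best).getD ""

-- ===== PRECONDITION & SPEC =====
def Spec_board_for_tags (tags : List String) (out : String) : Prop := out = board_for_tags_alt tags
instance (tags : List String) (out : String) : Decidable (Spec_board_for_tags tags out) := by unfold Spec_board_for_tags; infer_instance

-- ===== CLAIM (what is proved, stated in full; the proofs are below) =====
def Claim_equal_board_for_tags : Prop := ∀ (tags : List String), Dom_board_for_tags tags → Spec_board_for_tags tags (board_for_tags tags)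

-- ===== LEMMAS AND PROOFS =====

-- B's per-tag priority
def pvPrio (t : String) : Int := PySem.Dict.getD pvTriggerPriority (PySem.Str.lower t) 5

-- B's accumulator loop
def pvFold (tags : List String) (acc : Int) : Int :=
  tags.foldl (fun b t => min b (pvPrio t)) acc

lemma pvFold_le_init (tags : List String) (acc : Int) : pvFold tags acc ≤ acc := by
  induction tags generalizing acc with
  | nil => simp [pvFold]
  | cons t ts ih =>
      calc pvFold (t :: ts) acc = pvFold ts (min acc (pvPrio t)) := rfl
        _ ≤ min acc (pvPrio t) := ih _
        _ ≤ acc := min_le_left _ _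

lemma pvFold_le_mem {t : String} (tags : List String) (acc : Int) (h : t ∈ tags) :
    pvFold tags acc ≤ pvPrio t := by
  induction tags generalizing acc with
  | nil => cases h
  | cons u ts ih =>
      rcases List.mem_cons.mp h with h1 | h2
      · subst h1
        calc pvFold (t :: ts) acc = pvFold ts (min acc (pvPrio t)) := rfl
          _ ≤ min acc (pvPrio t) := pvFold_le_init _ _
          _ ≤ pvPrio t := min_le_right _ _
      · exact ih _ h2

lemma pvFold_ge {tags : List String} {k : Int} (h : ∀ t ∈ tags, k ≤ pvPrio t)
    {acc : Int} (hk : k ≤ acc) : k ≤ pvFold tags acc := by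
  induction tags generalizing acc with
  | nil => simpa [pvFold] using hk
  | cons u ts ih =>
      have : k ≤ min acc (pvPrio u) := le_min hk (h u (List.mem_cons_self ..))
      exact ih (fun t ht => h t (List.mem_cons_of_mem _ ht)) this

lemma pvContains_iff (tags : List String) (x : String) :
    PySem.Set.contains (PySem.Set.ofList (tags.map PySem.Str.lower)) x = true ↔
      ∃ t ∈ tags, PySem.Str.lower t = x := by
  simp [PySem.Set.contains, PySem.Set.mem_ofList, List.mem_map]

set_option maxHeartbeats 1000000 in
lemma pvPrio_cases (t : String) :
    pvPrio t =
      if "suicide prevention" = PySem.Str.lower t ∨ "crisis planning" = PySem.Str.lower t then 0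
      else if "couples help" = PySem.Str.lower t ∨ "relationship help" = PySem.Str.lower t then 1
      else if "parenting stress" = PySem.Str.lower t ∨ "family conflict" = PySem.Str.lower t then 2
      else if "sleep help" = PySem.Str.lower t ∨ "insomnia help" = PySem.Str.lower t ∨ "sleep hygiene" = PySem.Str.lower t then 3
      else if "burnout" = PySem.Str.lower t ∨ "burnout recovery" = PySem.Str.lower t ∨ "work stress" = PySem.Str.lower t then 4
      else 5 := by
  unfold pvPrio
  generalize PySem.Str.lower t = s
  have hd : pvTriggerPriority = PySem.Dict.mk
      [ ("suicide prevention", 0), ("crisis planning", 0),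
        ("couples help", 1), ("relationship help", 1),
        ("parenting stress", 2), ("family conflict", 2),
        ("sleep help", 3), ("insomnia help", 3), ("sleep hygiene", 3),
        ("burnout", 4), ("burnout recovery", 4), ("work stress", 4) ] := by decide
  rw [hd]; clear hd
  simp only [PySem.Dict.getD, PySem.Dict.get?_mk_cons, beq_iff_eq]
  split_ifs <;> simp_all [PySem.Dict.get?]

lemma pvPrio_nonneg (t : String) : 0 ≤ pvPrio t := by
  rw [pvPrio_cases]; split_ifs <;> omega

lemma pvPrio_eq0 {t : String}
    (h : PySem.Str.lower t = "suicide prevention" ∨ PySem.Str.lower t = "crisis planning") :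
    pvPrio t = 0 := by
  rw [pvPrio_cases]; rcases h with h | h <;> rw [h] <;> decide

lemma pvPrio_eq1 {t : String}
    (h : PySem.Str.lower t = "couples help" ∨ PySem.Str.lower t = "relationship help") :
    pvPrio t = 1 := by
  rw [pvPrio_cases]; rcases h with h | h <;> rw [h] <;> decide

lemma pvPrio_eq2 {t : String}
    (h : PySem.Str.lower t = "parenting stress" ∨ PySem.Str.lower t = "family conflict") :
    pvPrio t = 2 := by
  rw [pvPrio_cases]; rcases h with h | h <;> rw [h] <;> decide

lemma pvPrio_eq3 {t : String}
    (h : PySem.Str.lower t = "sleep help" ∨ PySem.Str.lower t = "insomnia help" ∨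
      PySem.Str.lower t = "sleep hygiene") :
    pvPrio t = 3 := by
  rw [pvPrio_cases]; rcases h with h | h | h <;> rw [h] <;> decide

lemma pvPrio_eq4 {t : String}
    (h : PySem.Str.lower t = "burnout" ∨ PySem.Str.lower t = "burnout recovery" ∨
      PySem.Str.lower t = "work stress") :
    pvPrio t = 4 := by
  rw [pvPrio_cases]; rcases h with h | h | h <;> rw [h] <;> decide

lemma pvPrio_ge1 {t : String}
    (n1 : PySem.Str.lower t ≠ "suicide prevention") (n2 : PySem.Str.lower t ≠ "crisis planning") :
    1 ≤ pvPrio t := by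
  rw [pvPrio_cases]; split_ifs with h <;> try omega
  rcases h with h | h
  exacts [absurd h.symm n1, absurd h.symm n2]

lemma pvPrio_ge2 {t : String}
    (n1 : PySem.Str.lower t ≠ "suicide prevention") (n2 : PySem.Str.lower t ≠ "crisis planning")
    (n3 : PySem.Str.lower t ≠ "couples help") (n4 : PySem.Str.lower t ≠ "relationship help") :
    2 ≤ pvPrio t := by
  rw [pvPrio_cases]; split_ifs with h h' <;> try omega
  · rcases h with h | h
    exacts [absurd h.symm n1, absurd h.symm n2]
  · rcases h' with h' | h'
    exacts [absurd h'.symm n3, absurd h'.symm n4]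

lemma pvPrio_ge3 {t : String}
    (n1 : PySem.Str.lower t ≠ "suicide prevention") (n2 : PySem.Str.lower t ≠ "crisis planning")
    (n3 : PySem.Str.lower t ≠ "couples help") (n4 : PySem.Str.lower t ≠ "relationship help")
    (n5 : PySem.Str.lower t ≠ "parenting stress") (n6 : PySem.Str.lower t ≠ "family conflict") :
    3 ≤ pvPrio t := by
  rw [pvPrio_cases]; split_ifs with h h' h'' <;> try omega
  · rcases h with h | h
    exacts [absurd h.symm n1, absurd h.symm n2]
  · rcases h' with h' | h'
    exacts [absurd h'.symm n3, absurd h'.symm n4]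
  · rcases h'' with h'' | h''
    exacts [absurd h''.symm n5, absurd h''.symm n6]

lemma pvPrio_ge4 {t : String}
    (n1 : PySem.Str.lower t ≠ "suicide prevention") (n2 : PySem.Str.lower t ≠ "crisis planning")
    (n3 : PySem.Str.lower t ≠ "couples help") (n4 : PySem.Str.lower t ≠ "relationship help")
    (n5 : PySem.Str.lower t ≠ "parenting stress") (n6 : PySem.Str.lower t ≠ "family conflict")
    (n7 : PySem.Str.lower t ≠ "sleep help") (n8 : PySem.Str.lower t ≠ "insomnia help")
    (n9 : PySem.Str.lower t ≠ "sleep hygiene") :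
    4 ≤ pvPrio t := by
  rw [pvPrio_cases]; split_ifs with h h' h'' h3 <;> try omega
  · rcases h with h | h
    exacts [absurd h.symm n1, absurd h.symm n2]
  · rcases h' with h' | h'
    exacts [absurd h'.symm n3, absurd h'.symm n4]
  · rcases h'' with h'' | h''
    exacts [absurd h''.symm n5, absurd h''.symm n6]
  · rcases h3 with h3 | h3 | h3
    exacts [absurd h3.symm n7, absurd h3.symm n8, absurd h3.symm n9]

lemma pvPrio_ge5 {t : String}
    (n1 : PySem.Str.lower t ≠ "suicide prevention") (n2 : PySem.Str.lower t ≠ "crisis planning")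
    (n3 : PySem.Str.lower t ≠ "couples help") (n4 : PySem.Str.lower t ≠ "relationship help")
    (n5 : PySem.Str.lower t ≠ "parenting stress") (n6 : PySem.Str.lower t ≠ "family conflict")
    (n7 : PySem.Str.lower t ≠ "sleep help") (n8 : PySem.Str.lower t ≠ "insomnia help")
    (n9 : PySem.Str.lower t ≠ "sleep hygiene")
    (n10 : PySem.Str.lower t ≠ "burnout") (n11 : PySem.Str.lower t ≠ "burnout recovery")
    (n12 : PySem.Str.lower t ≠ "work stress") :
    5 ≤ pvPrio t := by
  rw [pvPrio_cases]; split_ifs with h h' h'' h3 h4 <;> try omega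
  · rcases h with h | h
    exacts [absurd h.symm n1, absurd h.symm n2]
  · rcases h' with h' | h'
    exacts [absurd h'.symm n3, absurd h'.symm n4]
  · rcases h'' with h'' | h''
    exacts [absurd h''.symm n5, absurd h''.symm n6]
  · rcases h3 with h3 | h3 | h3
    exacts [absurd h3.symm n7, absurd h3.symm n8, absurd h3.symm n9]
  · rcases h4 with h4 | h4 | h4
    exacts [absurd h4.symm n10, absurd h4.symm n11, absurd h4.symm n12]

lemma pvFold_eq (tags : List String) (k : Int) (hk : k ≤ 5)
    (hub : ∃ t ∈ tags, pvPrio t = k) (hlb : ∀ t ∈ tags, k ≤ pvPrio t) :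
    pvFold tags 5 = k := by
  obtain ⟨t, ht, hv⟩ := hub
  exact le_antisymm (hv ▸ pvFold_le_mem tags 5 ht) (pvFold_ge hlb hk)

lemma pvAlt_eq (tags : List String) :
    board_for_tags_alt tags = (PySem.List.pyGet? pvBoards (pvFold tags 5)).getD "" := rfl

-- ===== VERDICT (by name: the statement is the Claim_ definition above) =====
set_option maxHeartbeats 1000000 in
theorem board_for_tags_spec : Claim_equal_board_for_tags := by
  intro tags _
  unfold Spec_board_for_tags
  rw [pvAlt_eq]
  simp only [board_for_tags]
  split_ifs with h0 h1 h2 h3 h4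
  · simp only [Bool.or_eq_true, pvContains_iff] at h0
    have hf : pvFold tags 5 = 0 := by
      refine pvFold_eq tags 0 (by omega) ?_ (fun t _ => pvPrio_nonneg t)
      rcases h0 with ⟨t, ht, hl⟩ | ⟨t, ht, hl⟩ <;> exact ⟨t, ht, pvPrio_eq0 (by tauto)⟩
    rw [hf]; decide
  · simp only [Bool.or_eq_true, pvContains_iff, not_or, not_exists, not_and] at h0
    simp only [Bool.or_eq_true, pvContains_iff] at h1
    have hf : pvFold tags 5 = 1 := by
      refine pvFold_eq tags 1 (by omega) ?_
        (fun t ht => pvPrio_ge1 (h0.1 t ht) (h0.2 t ht))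
      rcases h1 with ⟨t, ht, hl⟩ | ⟨t, ht, hl⟩ <;> exact ⟨t, ht, pvPrio_eq1 (by tauto)⟩
    rw [hf]; decide
  · simp only [Bool.or_eq_true, pvContains_iff, not_or, not_exists, not_and] at h0 h1
    simp only [Bool.or_eq_true, pvContains_iff] at h2
    have hf : pvFold tags 5 = 2 := by
      refine pvFold_eq tags 2 (by omega) ?_
        (fun t ht => pvPrio_ge2 (h0.1 t ht) (h0.2 t ht) (h1.1 t ht) (h1.2 t ht))
      rcases h2 with ⟨t, ht, hl⟩ | ⟨t, ht, hl⟩ <;> exact ⟨t, ht, pvPrio_eq2 (by tauto)⟩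
    rw [hf]; decide
  · simp only [Bool.or_eq_true, pvContains_iff, not_or, not_exists, not_and] at h0 h1 h2
    simp only [Bool.or_eq_true, pvContains_iff] at h3
    have hf : pvFold tags 5 = 3 := by
      refine pvFold_eq tags 3 (by omega) ?_
        (fun t ht => pvPrio_ge3 (h0.1 t ht) (h0.2 t ht) (h1.1 t ht) (h1.2 t ht)
          (h2.1 t ht) (h2.2 t ht))
      rcases h3 with (⟨t, ht, hl⟩ | ⟨t, ht, hl⟩) | ⟨t, ht, hl⟩ <;>
        exact ⟨t, ht, pvPrio_eq3 (by tauto)⟩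
    rw [hf]; decide
  · simp only [Bool.or_eq_true, pvContains_iff, not_or, not_exists, not_and] at h0 h1 h2 h3
    simp only [Bool.or_eq_true, pvContains_iff] at h4
    have hf : pvFold tags 5 = 4 := by
      refine pvFold_eq tags 4 (by omega) ?_
        (fun t ht => pvPrio_ge4 (h0.1 t ht) (h0.2 t ht) (h1.1 t ht) (h1.2 t ht)
          (h2.1 t ht) (h2.2 t ht) (h3.1.1 t ht) (h3.1.2 t ht) (h3.2 t ht))
      rcases h4 with (⟨t, ht, hl⟩ | ⟨t, ht, hl⟩) | ⟨t, ht, hl⟩ <;>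
        exact ⟨t, ht, pvPrio_eq4 (by tauto)⟩
    rw [hf]; decide
  · simp only [Bool.or_eq_true, pvContains_iff, not_or, not_exists, not_and] at h0 h1 h2 h3 h4
    have hf : pvFold tags 5 = 5 := by
      refine le_antisymm (pvFold_le_init tags 5) (pvFold_ge ?_ le_rfl)
      exact fun t ht => pvPrio_ge5 (h0.1 t ht) (h0.2 t ht) (h1.1 t ht) (h1.2 t ht)
        (h2.1 t ht) (h2.2 t ht) (h3.1.1 t ht) (h3.1.2 t ht) (h3.2 t ht)
        (h4.1.1 t ht) (h4.1.2 t ht) (h4.2 t ht)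
    rw [hf]; decide
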